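-- pv_equiv track=rewrite | github.com/ysl-lab/CP_tutorial | NIP/CP_turns.py | check_linkers
-- ===== SOURCE A (Python) =====
-- def check_linkers(turns):
--    """
--    takes list with turn classifications for each residue
--    checks for only 2 residues without turn classifications
--    checks if two non-turn residues are next to each other
--    NOTE: only really for 6mers
--    """
--    if turns.count('-') != 2:
--       return False
--    else:
--       for i in range(len(turns)-1):
--          if turns[i] == '-' and turns[i+1] == '-':
--             return False
--       if turns[-1] == '-' and turns[0] == '-': return False
--    return True
-- ===== SOURCE B (Python) =====
-- def check_linkers(turns):
--     pos = [i for i, t in enumerate(turns) if t == '-']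
--     if len(pos) != 2:
--         return False
--     a, b = pos
--     return not (b - a == 1 or (a == 0 and b == len(turns) - 1))
-- ===== Notes on version B (the rewrite author's own statement) =====
-- stated objective: simpler
-- what changed: Replaces the scan for a consecutive '-' pair plus a separate wrap check with a single comprehension collecting the '-' positions, followed by an arithmetic adjacency test on exactly those two indices.
import Mathlib
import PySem

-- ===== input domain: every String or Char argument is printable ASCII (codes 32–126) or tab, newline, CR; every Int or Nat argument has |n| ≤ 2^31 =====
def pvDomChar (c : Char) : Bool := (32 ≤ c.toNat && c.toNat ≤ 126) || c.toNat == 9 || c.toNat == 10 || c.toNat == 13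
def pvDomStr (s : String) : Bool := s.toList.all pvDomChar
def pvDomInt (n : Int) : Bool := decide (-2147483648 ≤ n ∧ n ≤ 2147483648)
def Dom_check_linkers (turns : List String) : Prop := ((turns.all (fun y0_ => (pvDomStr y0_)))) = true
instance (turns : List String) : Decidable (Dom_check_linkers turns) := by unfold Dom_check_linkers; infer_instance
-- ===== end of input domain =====

-- B replaces A's consecutive-pair scan + wrap check by collecting the two '-' positions and testing their adjacency arithmetically (objective: simpler).

-- ===== PORT A =====
def check_linkers (turns : List String) : Bool :=
  if PySem.List.count turns "-" ≠ 2 then false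
  else if (PySem.List.pyRange 0 ((turns.length : Int) - 1) 1).any
      (fun i => PySem.List.pyGet? turns i == some "-" && PySem.List.pyGet? turns (i + 1) == some "-") then false
  else if PySem.List.pyGet? turns (-1) == some "-" && PySem.List.pyGet? turns 0 == some "-" then false
  else true

-- ===== PORT B =====
def check_linkers_alt (turns : List String) : Bool :=
  let pos := ((PySem.List.enumerate turns 0).filter (fun p => p.2 == "-")).map (·.1)
  match pos with
  | [a, b] => !((b - a == 1) || (a == 0 && b == (turns.length : Int) - 1))
  | _ => false

-- ===== PRECONDITION & SPEC =====
def Spec_check_linkers (turns : List String) (out : Bool) : Prop := out = check_linkers_alt turns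
instance (turns : List String) (out : Bool) : Decidable (Spec_check_linkers turns out) := by unfold Spec_check_linkers; infer_instance

-- ===== CLAIM (what is proved, stated in full; the proofs are below) =====
def Claim_equal_check_linkers : Prop := ∀ (turns : List String), Dom_check_linkers turns → Spec_check_linkers turns (check_linkers turns)

-- ===== LEMMAS AND PROOFS =====

-- the '-'-position list of B, with the enumeration start generalized for induction
def posOf (turns : List String) (s : Int) : List Int :=
  ((PySem.List.enumerate turns s).filter (fun p => p.2 == "-")).map (·.1)

theorem posOf_nil (s : Int) : posOf [] s = [] := rfl

theorem posOf_cons (x : List String) (a : String) (s : Int) :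
    posOf (a :: x) s = (if a = "-" then [s] else []) ++ posOf x (s + 1) := by
  simp [posOf, PySem.List.enumerate_cons, List.filter_cons]
  split_ifs <;> simp_all

theorem mem_posOf (turns : List String) (s i : Int) :
    i ∈ posOf turns s ↔ ∃ k : Nat, ∃ h : k < turns.length, turns[k] = "-" ∧ i = s + k := by
  induction turns generalizing s with
  | nil => simp [posOf_nil]
  | cons a x ih =>
    rw [posOf_cons]
    simp only [List.mem_append, ih]
    constructor
    · rintro (h | ⟨k, hk, hdash, rfl⟩)
      · split_ifs at h with ha
        · simp at h; exact ⟨0, by simp, by simpa [h] using ha⟩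
        · simp at h
      · exact ⟨k + 1, by simp at hk ⊢; omega, by simpa using hdash, by push_cast; ring⟩
    · rintro ⟨k, hk, hdash, rfl⟩
      cases k with
      | zero => left; simp_all
      | succ k =>
        right
        exact ⟨k, by simp at hk; omega, by simpa using hdash, by push_cast; ring⟩

theorem length_posOf (turns : List String) (s : Int) :
    (posOf turns s).length = turns.count "-" := by
  induction turns generalizing s with
  | nil => rfl
  | cons a x ih =>
    rw [posOf_cons]
    rw [List.length_append, ih, List.count_cons]
    by_cases h : a = "-"
    · simp [h]; omega
    · simp [h]

theorem sorted_posOf (turns : List String) (s : Int) :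
    (posOf turns s).Pairwise (· < ·) := by
  induction turns generalizing s with
  | nil => simp [posOf_nil]
  | cons a x ih =>
    rw [posOf_cons]
    refine List.pairwise_append.mpr ⟨by split_ifs <;> simp, ih (s + 1), ?_⟩
    intro p hp q hq
    have hp' : p = s := by split_ifs at hp <;> simp_all
    have := (mem_posOf x (s + 1) q).mp hq
    omega

-- posOf characterization assembled for the two-linker case
theorem dash_iff (turns : List String) (a b : Int) (hab : posOf turns 0 = [a, b])
    (k : Nat) (hk : k < turns.length) :
    turns[k] = "-" ↔ (k : Int) = a ∨ (k : Int) = b := by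
  constructor
  · intro hd
    have : (k : Int) ∈ posOf turns 0 := (mem_posOf turns 0 k).mpr ⟨k, hk, hd, by omega⟩
    rw [hab] at this; simpa using this
  · intro h
    have : (k : Int) ∈ posOf turns 0 := by rw [hab]; simpa using h
    obtain ⟨k', hk', hd', he⟩ := (mem_posOf turns 0 ((k : Int))).mp this
    have : k = k' := by omega
    subst this; exact hd'

-- ===== VERDICT (by name: the statement is the Claim_ definition above) =====
theorem check_linkers_spec : Claim_equal_check_linkers := by
  intro turns _
  unfold Spec_check_linkers check_linkers check_linkers_alt
  have hposdef : ((PySem.List.enumerate turns 0).filter (fun p => p.2 == "-")).map (·.1)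
      = posOf turns 0 := rfl
  rw [hposdef]
  by_cases hc : turns.count "-" = 2
  · -- exactly two '-'
    have hlen2 : (posOf turns 0).length = 2 := by rw [length_posOf, hc]
    obtain ⟨a, b, hab⟩ := List.length_eq_two.mp hlen2
    obtain ⟨ka, hka, hdka, hae⟩ := (mem_posOf turns 0 a).mp (by rw [hab]; simp)
    obtain ⟨kb, hkb, hdkb, hbe⟩ := (mem_posOf turns 0 b).mp (by rw [hab]; simp)
    have hsort : a < b := by
      have := sorted_posOf turns 0; rw [hab] at this; simpa using this
    have hcnt : ¬ (PySem.List.count turns "-" ≠ 2) := by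
      simp [PySem.List.count_eq, hc]
    rw [if_neg hcnt, hab]
    have hn1 : 1 ≤ turns.length := by omega
    by_cases hadj : kb = ka + 1
    · -- adjacent pair: both return false
      have hany : (PySem.List.pyRange 0 ((turns.length : Int) - 1) 1).any
          (fun i => PySem.List.pyGet? turns i == some "-" && PySem.List.pyGet? turns (i + 1) == some "-") = true := by
        rw [List.any_eq_true]
        refine ⟨(ka : Int), PySem.List.mem_pyRange_one.mpr ⟨by omega, by omega⟩, ?_⟩
        have h1 : PySem.List.pyGet? turns (ka : Int) = some "-" := by
          simp [PySem.List.pyGet?_natCast, List.getElem?_eq_getElem hka, hdka]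
        have h2 : PySem.List.pyGet? turns ((ka : Int) + 1) = some "-" := by
          have : ((ka : Int) + 1) = ((kb : Nat) : Int) := by omega
          rw [this]
          simp [PySem.List.pyGet?_natCast, List.getElem?_eq_getElem hkb, hdkb]
        simp [h1, h2]
      rw [if_pos hany]
      have : (b - a == 1) = true := by simp; omega
      simp [this]
    · -- not consecutively adjacent
      have hany : (PySem.List.pyRange 0 ((turns.length : Int) - 1) 1).any
          (fun i => PySem.List.pyGet? turns i == some "-" && PySem.List.pyGet? turns (i + 1) == some "-") = false := by
        rw [List.any_eq_false]
        rintro i hi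
        rw [PySem.List.mem_pyRange_one] at hi
        simp only [Bool.and_eq_true, beq_iff_eq, not_and]
        intro h1 h2
        have h0i : 0 ≤ i := hi.1
        obtain ⟨k, rfl⟩ := Int.eq_ofNat_of_zero_le h0i
        have hklt : k < turns.length := by omega
        rw [PySem.List.pyGet?_natCast] at h1
        have hd1 : turns[k] = "-" := by
          rw [List.getElem?_eq_getElem hklt] at h1; simpa using h1
        have hk1lt : k + 1 < turns.length := by omega
        have h2' : PySem.List.pyGet? turns (((k + 1 : Nat) : Int)) = some "-" := by
          rw [show (((k + 1 : Nat) : Int)) = (k : Int) + 1 by push_cast; ring]; exact h2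
        rw [PySem.List.pyGet?_natCast] at h2'
        have hd2 : turns[k + 1] = "-" := by
          rw [List.getElem?_eq_getElem hk1lt] at h2'; simpa using h2'
        have c1 := (dash_iff turns a b hab k hklt).mp hd1
        have c2 := (dash_iff turns a b hab (k + 1) hk1lt).mp hd2
        push_cast at c1 c2
        omega
      rw [hany, if_neg (by simp)]
      have hbma : (b - a == 1) = false := by simp; omega
      by_cases hw : ka = 0 ∧ kb = turns.length - 1
      · -- wrap-around adjacent: both return false
        obtain ⟨hw1, hw2⟩ := hw
        subst hw1; subst hw2
        have hlast : PySem.List.pyGet? turns (-1) = some "-" := by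
          rw [PySem.List.pyGet?_neg_one, List.getLast?_eq_getElem?,
            List.getElem?_eq_getElem (by omega : turns.length - 1 < turns.length)]
          exact congrArg some hdkb
        have hfirst : PySem.List.pyGet? turns 0 = some "-" := by
          rw [PySem.List.pyGet?_zero, List.getElem?_eq_getElem (by omega : 0 < turns.length)]
          exact congrArg some hdka
        rw [if_pos (by simp [hlast, hfirst])]
        have ha0 : (a == 0) = true := by simp; omega
        have hb1 : (b == (turns.length : Int) - 1) = true := by simp; omega
        simp [hbma, ha0, hb1]
      · -- no adjacency at all: both return true
        have hwrap : (PySem.List.pyGet? turns (-1) == some "-" && PySem.List.pyGet? turns 0 == some "-") = false := by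
          simp only [Bool.and_eq_false_iff, beq_eq_false_iff_ne, Ne]
          by_cases hl : PySem.List.pyGet? turns (-1) = some "-"
          · right
            rw [PySem.List.pyGet?_neg_one, List.getLast?_eq_getElem?,
              List.getElem?_eq_getElem (by omega : turns.length - 1 < turns.length)] at hl
            have hdl : turns[turns.length - 1] = "-" := by simpa using hl
            have cl := (dash_iff turns a b hab (turns.length - 1) (by omega)).mp hdl
            intro hf
            rw [PySem.List.pyGet?_zero, List.getElem?_eq_getElem (by omega : 0 < turns.length)] at hf
            have hdf : turns[(0 : Nat)] = "-" := by simpa using hf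
            have cf := (dash_iff turns a b hab 0 (by omega)).mp hdf
            push_cast at cl cf
            omega
          · left; exact hl
        rw [hwrap, if_neg (by simp)]
        have ha0b : ¬ ((a == 0) = true ∧ (b == (turns.length : Int) - 1) = true) := by
          simp only [beq_iff_eq]
          intro ⟨h1, h2⟩
          apply hw
          constructor <;> omega
        rcases Decidable.not_and_iff_not_or_not.mp ha0b with h | h <;>
          simp [hbma, Bool.eq_false_iff.mpr h]
  · -- count ≠ 2: both return false
    have hcnt : PySem.List.count turns "-" ≠ 2 := by
      simp [PySem.List.count_eq]; omega
    rw [if_pos hcnt]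
    have hlen : (posOf turns 0).length ≠ 2 := by rw [length_posOf]; omega
    match hp : posOf turns 0 with
    | [] => rfl
    | [_] => rfl
    | _ :: _ :: _ :: _ => rfl
    | [x, y] => rw [hp] at hlen; simp at hlen
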